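-- pv_equiv track=rewrite | github.com/lokesh-lraj/A-helping-hand | widestGap.py | widestGap
-- ===== SOURCE A (Python) =====
-- def widestGap(n, start, finish):
-- 	count = len(start)
-- 	d = dict()
-- 	for i, elem in enumerate(start):
-- 		if elem in d:
-- 			d[elem] = max(d[elem], finish[i])
-- 		else:
-- 			d[elem] = finish[i]
--
-- 	d = sorted(d.items())
--
-- 	pr = None
-- 	ans = 0
-- 	for car in d:
-- 		if pr == None:
-- 			pr = car[1]
-- 		else:
-- 			v = (car[0]-pr-1)
-- 			if v > ans:
-- 				ans = v
-- 			pr = max(pr, car[1])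
-- 	return ans
-- ===== SOURCE B (Python) =====
-- def widestGap(n, start, finish):
--     ans = 0
--     for s in set(start):
--         m = None
--         for i, t in enumerate(start):
--             if t < s:
--                 f = finish[i]
--                 m = f if m is None else max(m, f)
--         if m is not None:
--             v = s - m - 1
--             if v > ans:
--                 ans = v
--     return ans
-- ===== Notes on version B (the rewrite author's own statement) =====
-- stated objective: alternative
-- what changed: Replaces the dict-grouping pass plus sorted sweep with a sort-free brute force: for each distinct start, one full scan computes the max finish among strictly smaller starts and the gap is taken directly; correct because A's running pr at key s is exactly max{finish[i] : start[i] < s}.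
import Mathlib
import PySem

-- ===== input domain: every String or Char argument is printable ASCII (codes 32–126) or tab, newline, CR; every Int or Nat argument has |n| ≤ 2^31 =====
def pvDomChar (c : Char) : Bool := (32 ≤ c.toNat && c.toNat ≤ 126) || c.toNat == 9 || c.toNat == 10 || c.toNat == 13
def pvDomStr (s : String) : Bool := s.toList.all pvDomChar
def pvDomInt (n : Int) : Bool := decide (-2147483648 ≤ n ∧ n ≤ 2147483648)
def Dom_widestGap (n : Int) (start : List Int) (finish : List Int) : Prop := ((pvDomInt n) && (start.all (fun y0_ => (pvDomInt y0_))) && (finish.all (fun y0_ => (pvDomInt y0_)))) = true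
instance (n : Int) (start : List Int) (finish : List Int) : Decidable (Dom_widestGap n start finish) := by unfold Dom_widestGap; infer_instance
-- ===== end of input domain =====

-- B replaces A's dict-grouping + sorted sweep by a sort-free brute force: for each distinct
-- start, one full scan finds the max finish among strictly smaller starts (alternative algorithm).


-- ===== PORT A =====
def widestGap (n : Int) (start : List Int) (finish : List Int) : Int :=
  let _count : Int := (start.length : Int)
  let d : PySem.Dict Int Int :=
    (PySem.List.enumerate start 0).foldl
      (fun d p =>
        if d.contains p.2 then
          -- d[elem] = max(d[elem], finish[i]); pyGetD is exact for 0 ≤ i < len(finish) (Pre_)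
          d.modify p.2 0 (fun old => max old (PySem.List.pyGetD finish p.1 0))
        else
          d.insert p.2 (PySem.List.pyGetD finish p.1 0))
      PySem.Dict.empty
  let ds := PySem.List.sorted2 d.items (fun q => q.1) (fun q => q.2) false
  let r :=
    ds.foldl
      (fun (st : Option Int × Int) car =>
        match st.1 with
        | none => (some car.2, st.2)
        | some pr =>
            let v := car.1 - pr - 1
            let ans := if v > st.2 then v else st.2
            (some (max pr car.2), ans))
      (none, 0)
  r.2

-- ===== PORT B =====
def widestGap_alt (n : Int) (start : List Int) (finish : List Int) : Int :=
  (PySem.Set.ofList start).foldl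
    (fun ans s =>
      let m :=
        (PySem.List.enumerate start 0).foldl
          (fun (m : Option Int) p =>
            if p.2 < s then
              -- f = finish[i]; pyGetD is exact under Pre_
              some (match m with
                    | none => PySem.List.pyGetD finish p.1 0
                    | some mv => max mv (PySem.List.pyGetD finish p.1 0))
            else m)
          none
      match m with
      | none => ans
      | some mv => if s - mv - 1 > ans then s - mv - 1 else ans)
    0

-- ===== PRECONDITION & SPEC =====
-- Pre_ excludes exactly the inputs where A raises IndexError (finish[i] with i ≥ len(finish)).
def Pre_widestGap (n : Int) (start : List Int) (finish : List Int) : Prop :=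
  start.length ≤ finish.length
instance (n : Int) (start : List Int) (finish : List Int) : Decidable (Pre_widestGap n start finish) := by unfold Pre_widestGap; infer_instance
def pvWitness_widestGap : Int × List Int × List Int := (3, [1, 5, 10, 5], [2, 6, 11, 3])

def Spec_widestGap (n : Int) (start : List Int) (finish : List Int) (out : Int) : Prop := out = widestGap_alt n start finish
instance (n : Int) (start : List Int) (finish : List Int) (out : Int) : Decidable (Spec_widestGap n start finish out) := by unfold Spec_widestGap; infer_instance

-- ===== CLAIM (what is proved, stated in full; the proofs are below) =====
def Claim_equal_widestGap : Prop := ∀ (n : Int) (start : List Int) (finish : List Int), Dom_widestGap n start finish → Pre_widestGap n start finish → Spec_widestGap n start finish (widestGap n start finish)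

-- ===== LEMMAS AND PROOFS =====

-- ---- helper definitions used only by the proofs ----
def pvStep (d : PySem.Dict Int Int) (q : Int × Int) : PySem.Dict Int Int :=
  if d.contains q.1 then d.modify q.1 0 (fun old => max old q.2) else d.insert q.1 q.2

def pvBuild (L : List (Int × Int)) : PySem.Dict Int Int := L.foldl pvStep PySem.Dict.empty

def pvVmax : List Int → Int
  | [] => 0
  | x :: t => t.foldl max x

def pvVals (L : List (Int × Int)) (k : Int) : List Int :=
  (L.filter (fun p => p.1 == k)).map (fun p => p.2)

def pvCanon (L : List (Int × Int)) : List (Int × Int) :=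
  (PySem.List.sorted (PySem.List.dedup (L.map (fun p => p.1))) (fun x => x) false).map
    (fun k => (k, pvVmax (pvVals L k)))

def pvGo : List (Int × Int) → Int → Int → Int
  | [], _, ans => ans
  | c :: t, pr, ans => pvGo t (max pr c.2) (if c.1 - pr - 1 > ans then c.1 - pr - 1 else ans)

def pvGoWrap : List (Int × Int) → Int
  | [] => 0
  | c :: t => pvGo t c.2 0

def pvOmax (m : Option Int) (x : Int) : Option Int :=
  some (match m with | none => x | some v => max v x)

def pvBelow (L : List (Int × Int)) (k : Int) : Option Int :=
  L.foldl (fun m p => if p.1 < k then pvOmax m p.2 else m) none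

def pvStepB (L : List (Int × Int)) (ans k : Int) : Int :=
  match pvBelow L k with
  | none => ans
  | some mv => if k - mv - 1 > ans then k - mv - 1 else ans

def pvBLex (a b : Int × Int) : Bool :=
  decide (a.1 < b.1) || (!decide (b.1 < a.1) && decide (a.2 < b.2))

-- ---- sorted2 with distinct keys is sorted-by-fst ----
theorem pvSorted2_eq (xs : List (Int × Int)) :
    PySem.List.sorted2 xs (fun q => q.1) (fun q => q.2) false
      = xs.foldl (fun acc x => PySem.List.insertBy pvBLex x acc) [] := by
  rfl

theorem pvInsertBy_congr (b1 b2 : Int × Int → Int × Int → Bool) (x : Int × Int)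
    (l : List (Int × Int)) (h : ∀ y ∈ l, b1 x y = b2 x y) :
    PySem.List.insertBy b1 x l = PySem.List.insertBy b2 x l := by
  induction l with
  | nil => rfl
  | cons y ys ih =>
      rw [PySem.List.insertBy, PySem.List.insertBy, h y (by simp)]
      by_cases hb : b2 x y = true
      · simp [hb]
      · rw [if_neg hb, if_neg hb, ih (fun z hz => h z (by simp [hz]))]

theorem pvFoldl_insertBy_congr (b1 b2 : Int × Int → Int × Int → Bool) (S : List (Int × Int))
    (hS : ∀ x ∈ S, ∀ y ∈ S, b1 x y = b2 x y) :
    ∀ (xs acc : List (Int × Int)), (∀ x ∈ xs, x ∈ S) → (∀ y ∈ acc, y ∈ S) →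
      xs.foldl (fun acc x => PySem.List.insertBy b1 x acc) acc
        = xs.foldl (fun acc x => PySem.List.insertBy b2 x acc) acc := by
  intro xs
  induction xs with
  | nil => intro acc _ _; rfl
  | cons x t ih =>
      intro acc hxs hacc
      have hx : x ∈ S := hxs x (by simp)
      simp only [List.foldl_cons]
      rw [pvInsertBy_congr b1 b2 x acc (fun y hy => hS x hx y (hacc y hy))]
      exact ih _ (fun z hz => hxs z (by simp [hz]))
        (fun y hy => by
          rcases (PySem.List.mem_insertBy _ _ _ _).mp hy with rfl | hy
          · exact hx
          · exact hacc y hy)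

theorem pvSorted2_eq_sorted_fst (xs : List (Int × Int))
    (hnd : (xs.map (fun p => p.1)).Nodup) :
    PySem.List.sorted2 xs (fun q => q.1) (fun q => q.2) false
      = PySem.List.sorted xs (fun p => p.1) false := by
  rw [pvSorted2_eq, PySem.List.sorted_eq_foldl_insertBy]
  refine pvFoldl_insertBy_congr _ _ xs ?_ xs [] (fun x hx => hx) (by simp)
  intro x hx y hy
  by_cases hxy : x.1 = y.1
  · have hxeqy : x = y := List.inj_on_of_nodup_map hnd hx hy hxy
    subst hxeqy
    simp [pvBLex]
  · simp only [pvBLex]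
    rcases lt_trichotomy x.1 y.1 with h | h | h
    · simp [h, asymm h]
    · exact absurd h hxy
    · simp [h, asymm h]

-- ---- characterisation of A's dict ----
theorem pvVmax_append (l : List Int) (x : Int) :
    pvVmax (l ++ [x]) = if l = [] then x else max (pvVmax l) x := by
  cases l with
  | nil => simp [pvVmax]
  | cons y t => simp [pvVmax, List.foldl_append]

theorem pvVals_append (L : List (Int × Int)) (p : Int × Int) (k : Int) :
    pvVals (L ++ [p]) k = pvVals L k ++ (if p.1 = k then [p.2] else []) := by
  simp only [pvVals, List.filter_append, List.map_append]
  congr 1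
  by_cases h : p.1 = k <;> simp [h]

theorem pvVals_eq_nil_iff (L : List (Int × Int)) (k : Int) :
    pvVals L k = [] ↔ k ∉ L.map (fun p => p.1) := by
  simp only [pvVals, List.map_eq_nil_iff, List.filter_eq_nil_iff, List.mem_map]
  constructor
  · rintro h ⟨p, hp, rfl⟩
    exact absurd (by simp : (p.1 == p.1) = true) (h p hp)
  · intro h p hp hbeq
    exact h ⟨p, hp, by simpa using hbeq⟩

theorem pvBuild_keys (L : List (Int × Int)) :
    (pvBuild L).keys = PySem.List.dedup (L.map (fun p => p.1)) := by
  induction L using List.reverseRecOn with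
  | nil => simp [pvBuild, PySem.List.dedup_eq_ofList, PySem.Set.ofList_nil]
  | append_singleton M p ih =>
      have hfold : pvBuild (M ++ [p]) = pvStep (pvBuild M) p := by
        simp [pvBuild, List.foldl_append]
      have hmem : (pvBuild M).contains p.1 = decide (p.1 ∈ M.map (fun p => p.1)) := by
        rw [PySem.Dict.contains_eq_decide_mem_keys, ih, decide_eq_decide]
        exact PySem.List.mem_dedup _ _
      rw [hfold, pvStep]
      rw [List.map_append, List.map_singleton, PySem.List.dedup_eq_ofList,
        PySem.Set.ofList_append_singleton, PySem.Set.add_eq_ite]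
      by_cases hin : p.1 ∈ M.map (fun p => p.1)
      · rw [if_pos (show p.1 ∈ PySem.Set.ofList (M.map (fun p => p.1)) from
            (PySem.Set.mem_ofList _ _).mpr hin),
          if_pos (show (pvBuild M).contains p.1 = true by rw [hmem]; simpa using hin)]
        rw [PySem.Dict.keys_modify, PySem.Dict.keys_insert_of_contains _ _
            (by rw [hmem]; simpa using hin), ih, PySem.List.dedup_eq_ofList]
      · rw [if_neg (show ¬ p.1 ∈ PySem.Set.ofList (M.map (fun p => p.1)) from
            fun hc => hin ((PySem.Set.mem_ofList _ _).mp hc)),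
          if_neg (show ¬ (pvBuild M).contains p.1 = true by rw [hmem]; simpa using hin)]
        rw [PySem.Dict.keys_insert_of_not_contains _ _ (by rw [hmem]; simpa using hin), ih,
          PySem.List.dedup_eq_ofList]

theorem pvBuild_getD (L : List (Int × Int)) (k : Int) :
    (pvBuild L).getD k 0 = pvVmax (pvVals L k) := by
  induction L using List.reverseRecOn with
  | nil => simp [pvBuild, pvVals, pvVmax, PySem.Dict.getD_empty]
  | append_singleton M p ih =>
      have hfold : pvBuild (M ++ [p]) = pvStep (pvBuild M) p := by
        simp [pvBuild, List.foldl_append]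
      have hmem : (pvBuild M).contains p.1 = decide (p.1 ∈ M.map (fun p => p.1)) := by
        rw [PySem.Dict.contains_eq_decide_mem_keys, pvBuild_keys, decide_eq_decide]
        exact PySem.List.mem_dedup _ _
      rw [hfold, pvStep, pvVals_append]
      by_cases hin : p.1 ∈ M.map (fun p => p.1)
      · rw [if_pos (show (pvBuild M).contains p.1 = true by rw [hmem]; simpa using hin),
          PySem.Dict.getD_modify]
        have hne : pvVals M p.1 ≠ [] := by
          rw [Ne, pvVals_eq_nil_iff]; simpa using hin
        by_cases hk : k = p.1
        · subst hk
          rw [if_pos rfl, if_pos rfl, pvVmax_append, if_neg hne, ih]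
        · rw [if_neg hk, if_neg (fun h => hk h.symm), List.append_nil, ih]
      · rw [if_neg (show ¬ (pvBuild M).contains p.1 = true by rw [hmem]; simpa using hin),
          PySem.Dict.getD_insert]
        by_cases hk : k = p.1
        · subst hk
          have hnil : pvVals M p.1 = [] := (pvVals_eq_nil_iff M p.1).mpr hin
          rw [if_pos rfl, if_pos rfl, pvVmax_append, if_pos hnil]
        · rw [if_neg hk, if_neg (fun h => hk h.symm), List.append_nil, ih]

theorem pvBuild_items (L : List (Int × Int)) :
    (pvBuild L).items
      = (PySem.List.dedup (L.map (fun p => p.1))).map (fun k => (k, pvVmax (pvVals L k))) := by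
  have hnd : (pvBuild L).keys.Nodup := by
    rw [pvBuild_keys]; exact PySem.List.nodup_dedup _
  rw [PySem.Dict.items_eq_map_keys _ hnd 0, pvBuild_keys]
  exact List.map_congr_left (fun k _ => by rw [pvBuild_getD])

-- ---- canon facts ----
theorem pvCanon_pairwise (L : List (Int × Int)) :
    (pvCanon L).Pairwise (fun a b => a.1 < b.1) := by
  have hsp : (PySem.List.sorted (PySem.List.dedup (L.map (fun p => p.1))) (fun x => x) false).Pairwise
      (fun a b => a < b) := by
    have h1 := PySem.List.sorted_pairwise (PySem.List.dedup (L.map (fun p => p.1))) (fun x => x)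
    have h2 : (PySem.List.sorted (PySem.List.dedup (L.map (fun p => p.1))) (fun x => x) false).Nodup := by
      rw [(PySem.List.sorted_perm (PySem.List.dedup (L.map (fun p => p.1))) (fun x => x) false).nodup_iff]
      exact PySem.List.nodup_dedup _
    exact (h1.and h2).imp (fun {a b} h => lt_of_le_of_ne h.1 h.2)
  unfold pvCanon
  rw [List.pairwise_map]
  exact hsp

theorem pvSorted2_items_eq_canon (L : List (Int × Int)) :
    PySem.List.sorted2 (pvBuild L).items (fun q => q.1) (fun q => q.2) false = pvCanon L := by
  have hkeys : (pvBuild L).items.map (fun p => p.1)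
      = PySem.List.dedup (L.map (fun p => p.1)) := by
    rw [pvBuild_items, List.map_map]
    simp [Function.comp_def]
  have hnd : ((pvBuild L).items.map (fun p => p.1)).Nodup := by
    rw [hkeys]; exact PySem.List.nodup_dedup _
  rw [pvSorted2_eq_sorted_fst _ hnd]
  apply PySem.List.sorted_eq_of_perm_of_pairwise_lt
  · rw [pvBuild_items]
    exact (PySem.List.sorted_perm _ _ _).map _
  · exact pvCanon_pairwise L

theorem pvCanon_mem_iff (L : List (Int × Int)) (c : Int × Int) :
    c ∈ pvCanon L ↔ ∃ j ∈ L.map (fun p => p.1), c = (j, pvVmax (pvVals L j)) := by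
  unfold pvCanon
  rw [List.mem_map]
  constructor
  · rintro ⟨j, hj, rfl⟩
    refine ⟨j, ?_, rfl⟩
    exact (PySem.List.mem_dedup _ _).mp ((PySem.List.sorted_perm _ _ _).mem_iff.mp hj)
  · rintro ⟨j, hj, rfl⟩
    refine ⟨j, ?_, rfl⟩
    exact (PySem.List.sorted_perm _ _ _).mem_iff.mpr ((PySem.List.mem_dedup _ _).mpr hj)

-- ---- pvVmax extremal facts ----
theorem pvVmax_mem (l : List Int) (h : l ≠ []) : pvVmax l ∈ l := by
  cases l with
  | nil => exact absurd rfl h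
  | cons x t =>
      rcases PySem.List.foldl_max_mem t x with h1 | h1
      · show t.foldl max x ∈ x :: t
        rw [h1]; simp
      · show t.foldl max x ∈ x :: t
        simp [h1]

theorem pvVmax_ub (l : List Int) : ∀ z ∈ l, z ≤ pvVmax l := by
  cases l with
  | nil => intro z hz; simp at hz
  | cons x t =>
      intro z hz
      rcases List.mem_cons.mp hz with rfl | hz
      · exact (PySem.List.le_foldl_max t z).1
      · exact (PySem.List.le_foldl_max t x).2 z hz

-- ---- pvBelow characterisation ----
theorem pvBelow_some (k : Int) (t : List (Int × Int)) : ∀ a : Int,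
    t.foldl (fun m p => if p.1 < k then pvOmax m p.2 else m) (some a)
      = some (((t.filter (fun p => p.1 < k)).map (fun p => p.2)).foldl max a) := by
  induction t with
  | nil => intro a; rfl
  | cons p t' ih =>
      intro a
      simp only [List.foldl_cons, List.filter_cons]
      by_cases hp : p.1 < k
      · rw [if_pos hp, if_pos (by simpa using hp)]
        simp only [List.map_cons, List.foldl_cons]
        exact ih (max a p.2)
      · rw [if_neg hp, if_neg (by simpa using hp)]
        exact ih a

theorem pvBelow_spec (L : List (Int × Int)) (k : Int) :
    pvBelow L k
      = if L.filter (fun p => p.1 < k) = [] then none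
        else some (pvVmax ((L.filter (fun p => p.1 < k)).map (fun p => p.2))) := by
  induction L with
  | nil => rfl
  | cons p t ih =>
      unfold pvBelow at *
      simp only [List.foldl_cons, List.filter_cons]
      by_cases hp : p.1 < k
      · rw [if_pos hp, show (pvOmax none p.2) = some p.2 from rfl, pvBelow_some k t p.2]
        simp only [hp, decide_true, if_true]
        rw [if_neg (List.cons_ne_nil _ _)]
        simp [pvVmax]
      · rw [if_neg hp]
        simp only [hp, decide_false, Bool.false_eq_true, if_false]
        exact ih

-- the brute-force "max finish among smaller starts" agrees on L and on its grouped canon form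
theorem pvBelow_canon (L : List (Int × Int)) (k : Int) :
    pvBelow (pvCanon L) k = pvBelow L k := by
  rw [pvBelow_spec, pvBelow_spec]
  have hiff : (pvCanon L).filter (fun p => p.1 < k) = [] ↔ L.filter (fun p => p.1 < k) = [] := by
    simp only [List.filter_eq_nil_iff]
    constructor
    · intro h p hp
      have : (p.1, pvVmax (pvVals L p.1)) ∈ pvCanon L :=
        (pvCanon_mem_iff L _).mpr ⟨p.1, List.mem_map.mpr ⟨p, hp, rfl⟩, rfl⟩
      simpa using h _ this
    · intro h c hc
      rcases (pvCanon_mem_iff L c).mp hc with ⟨j, hj, rfl⟩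
      rcases List.mem_map.mp hj with ⟨p, hp, rfl⟩
      simpa using h p hp
  by_cases hnil : L.filter (fun p => p.1 < k) = []
  · rw [if_pos (hiff.mpr hnil), if_pos hnil]
  · rw [if_neg (fun h => hnil (hiff.mp h)), if_neg hnil]
    congr 1
    have hGne : (pvCanon L).filter (fun p => p.1 < k) ≠ [] := fun h => hnil (hiff.mp h)
    apply le_antisymm
    · -- canon max ≤ raw max
      have hm := pvVmax_mem (((pvCanon L).filter (fun p => p.1 < k)).map (fun p => p.2))
        (fun h => hGne (List.map_eq_nil_iff.mp h))
      rcases List.mem_map.mp hm with ⟨c, hc, hv⟩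
      rcases List.mem_filter.mp hc with ⟨hcmem, hck⟩
      rcases (pvCanon_mem_iff L c).mp hcmem with ⟨j, hj, rfl⟩
      rcases List.mem_map.mp hj with ⟨q, hq, rfl⟩
      -- c.2 = pvVmax (pvVals L q.1), an element of pvVals L q.1 ⊆ raw filtered values
      have hvne : pvVals L q.1 ≠ [] := by
        rw [Ne, pvVals_eq_nil_iff]
        exact fun hc' => hc' (List.mem_map.mpr ⟨q, hq, rfl⟩)
      have hmem2 := pvVmax_mem _ hvne
      rcases List.mem_map.mp hmem2 with ⟨r, hr, hrv⟩
      rcases List.mem_filter.mp hr with ⟨hrmem, hrk⟩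
      have hrlt : r.1 < k := by
        have : r.1 = q.1 := by simpa using hrk
        simpa [this] using hck
      rw [← hv]
      calc pvVmax (pvVals L q.1) = r.2 := hrv.symm
        _ ≤ _ := pvVmax_ub _ _ (List.mem_map.mpr ⟨r, List.mem_filter.mpr ⟨hrmem, by simpa using hrlt⟩, rfl⟩)
    · -- raw max ≤ canon max
      have hm := pvVmax_mem ((L.filter (fun p => p.1 < k)).map (fun p => p.2))
        (fun h => hnil (List.map_eq_nil_iff.mp h))
      rcases List.mem_map.mp hm with ⟨p, hp, hv⟩
      rcases List.mem_filter.mp hp with ⟨hpmem, hpk⟩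
      have hcmem : (p.1, pvVmax (pvVals L p.1)) ∈ pvCanon L :=
        (pvCanon_mem_iff L _).mpr ⟨p.1, List.mem_map.mpr ⟨p, hpmem, rfl⟩, rfl⟩
      have hple : p.2 ≤ pvVmax (pvVals L p.1) :=
        pvVmax_ub _ _ (List.mem_map.mpr ⟨p, List.mem_filter.mpr ⟨hpmem, by simp⟩, rfl⟩)
      rw [← hv]
      calc p.2 ≤ pvVmax (pvVals L p.1) := hple
        _ ≤ _ := pvVmax_ub _ _ (List.mem_map.mpr
            ⟨(p.1, pvVmax (pvVals L p.1)), List.mem_filter.mpr ⟨hcmem, by simpa using hpk⟩, rfl⟩)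

-- ---- A's sweep over the canon list = fold of pvStepB over its keys ----
theorem pvGoInv (C : List (Int × Int)) :
    ∀ (t : List (Int × Int)) (pr ans : Int),
      t.Pairwise (fun a b => a.1 < b.1) →
      (∀ q ∈ t, pvBelow C q.1
          = some (((t.filter (fun r => r.1 < q.1)).map (fun r => r.2)).foldl max pr)) →
      pvGo t pr ans = t.foldl (fun a c => pvStepB C a c.1) ans := by
  intro t
  induction t with
  | nil => intro pr ans _ _; rfl
  | cons q0 t' ih =>
      intro pr ans hpw hH
      obtain ⟨hhead, htail⟩ := List.pairwise_cons.mp hpw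
      have hfilt0 : (q0 :: t').filter (fun r => r.1 < q0.1) = [] := by
        rw [List.filter_eq_nil_iff]
        intro r hr
        rcases List.mem_cons.mp hr with rfl | hr
        · simp
        · simpa using (hhead r hr).not_gt
      have hq0 : pvBelow C q0.1 = some pr := by
        rw [hH q0 (by simp), hfilt0]; rfl
      rw [pvGo, List.foldl_cons]
      have hstep : pvStepB C ans q0.1 = if q0.1 - pr - 1 > ans then q0.1 - pr - 1 else ans := by
        rw [pvStepB, hq0]
      rw [← hstep]
      apply ih (max pr q0.2) _ htail
      intro q hq
      have hfilt : (q0 :: t').filter (fun r => r.1 < q.1)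
          = q0 :: t'.filter (fun r => r.1 < q.1) := by
        rw [List.filter_cons, if_pos (by simpa using hhead q hq)]
      have := hH q (by simp [hq])
      rw [hfilt] at this
      simpa using this

theorem pvGoWrap_eq_foldl (C : List (Int × Int))
    (hpw : C.Pairwise (fun a b => a.1 < b.1)) :
    pvGoWrap C = C.foldl (fun a c => pvStepB C a c.1) 0 := by
  cases C with
  | nil => rfl
  | cons c0 t =>
      obtain ⟨hhead, htail⟩ := List.pairwise_cons.mp hpw
      rw [pvGoWrap, List.foldl_cons]
      have hb0 : pvBelow (c0 :: t) c0.1 = none := by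
        rw [pvBelow_spec, if_pos]
        rw [List.filter_eq_nil_iff]
        intro r hr
        rcases List.mem_cons.mp hr with rfl | hr
        · simp
        · simpa using (hhead r hr).not_gt
      have hstep0 : pvStepB (c0 :: t) 0 c0.1 = 0 := by rw [pvStepB, hb0]
      rw [hstep0]
      apply pvGoInv (c0 :: t) t c0.2 0 htail
      intro q hq
      rw [pvBelow_spec]
      have hfilt : (c0 :: t).filter (fun r => r.1 < q.1)
          = c0 :: t.filter (fun r => r.1 < q.1) := by
        rw [List.filter_cons, if_pos (by simpa using hhead q hq)]
      rw [hfilt, if_neg (by simp)]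
      simp [pvVmax]

-- ---- pvStepB is right-commutative ----
theorem pvStepB_comm (L : List (Int × Int)) (x y z : Int) :
    pvStepB L (pvStepB L z x) y = pvStepB L (pvStepB L z y) x := by
  unfold pvStepB
  cases hx : pvBelow L x <;> cases hy : pvBelow L y <;> simp only []
  split_ifs <;> omega

-- ---- bridging the ports' folds ----
theorem pvFoldA (t : List (Int × Int)) : ∀ pr ans : Int,
    (t.foldl
      (fun (st : Option Int × Int) car =>
        match st.1 with
        | none => (some car.2, st.2)
        | some pr =>
            let v := car.1 - pr - 1
            let ans := if v > st.2 then v else st.2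
            (some (max pr car.2), ans))
      (some pr, ans)).2 = pvGo t pr ans := by
  induction t with
  | nil => intro pr ans; rfl
  | cons c t' ih =>
      intro pr ans
      simp only [List.foldl_cons]
      rw [pvGo]
      exact ih _ _

theorem pvFoldAWrap (ds : List (Int × Int)) :
    (ds.foldl
      (fun (st : Option Int × Int) car =>
        match st.1 with
        | none => (some car.2, st.2)
        | some pr =>
            let v := car.1 - pr - 1
            let ans := if v > st.2 then v else st.2
            (some (max pr car.2), ans))
      (none, 0)).2 = pvGoWrap ds := by
  cases ds with
  | nil => rfl
  | cons c t =>
      simp only [List.foldl_cons]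
      rw [pvGoWrap]
      exact pvFoldA t c.2 0

theorem pvEnumMap (start finish : List Int) (h : start.length ≤ finish.length) :
    (PySem.List.enumerate start 0).map (fun p => (p.2, PySem.List.pyGetD finish p.1 0))
      = start.zip finish := by
  apply List.ext_getElem
  · simp only [List.length_map, PySem.List.length_enumerate, List.length_zip]
    omega
  · intro i h1 h2
    simp only [List.length_map, PySem.List.length_enumerate] at h1
    simp only [List.getElem_map, List.getElem_zip]
    rw [PySem.List.getElem_enumerate _ _ _ (by simpa using h1)]
    have hif : i < finish.length := by
      simp only [List.length_zip] at h2
      omega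
    rw [zero_add, PySem.List.pyGetD_natCast, List.getD_eq_getElem _ _ hif]

theorem pvEnumFold (start finish : List Int) (h : start.length ≤ finish.length) :
    (PySem.List.enumerate start 0).foldl
      (fun d p =>
        if d.contains p.2 then d.modify p.2 0 (fun old => max old (PySem.List.pyGetD finish p.1 0))
        else d.insert p.2 (PySem.List.pyGetD finish p.1 0)) PySem.Dict.empty
    = pvBuild (start.zip finish) := by
  rw [pvBuild, ← pvEnumMap start finish h, List.foldl_map]
  rfl

theorem pvEnumFoldB (start finish : List Int) (s : Int) (h : start.length ≤ finish.length) :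
    (PySem.List.enumerate start 0).foldl
      (fun (m : Option Int) p =>
        if p.2 < s then
          some (match m with
                | none => PySem.List.pyGetD finish p.1 0
                | some mv => max mv (PySem.List.pyGetD finish p.1 0))
        else m)
      none
    = pvBelow (start.zip finish) s := by
  rw [pvBelow, ← pvEnumMap start finish h, List.foldl_map]
  rfl

-- ---- assembling both sides ----
theorem pvWidestGap_eq (n : Int) (start finish : List Int)
    (hpre : start.length ≤ finish.length) :
    widestGap n start finish = pvGoWrap (pvCanon (start.zip finish)) := by
  simp only [widestGap]
  rw [pvEnumFold start finish hpre, pvSorted2_items_eq_canon, pvFoldAWrap]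

theorem pvWidestGapAlt_eq (n : Int) (start finish : List Int)
    (hpre : start.length ≤ finish.length) :
    widestGap_alt n start finish = pvGoWrap (pvCanon (start.zip finish)) := by
  have hkeys : (start.zip finish).map (fun p => p.1) = start := by
    simpa using List.map_fst_zip hpre
  -- B's outer loop, rewritten through pvStepB
  have halt : widestGap_alt n start finish
      = (PySem.List.dedup start).foldl (pvStepB (start.zip finish)) 0 := by
    simp only [widestGap_alt]
    rw [PySem.List.dedup_eq_ofList]
    apply PySem.List.foldl_congr_mem
    intro ans s _
    rw [pvEnumFoldB start finish s hpre]
    rfl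
  rw [halt]
  -- fold over dedup keys = fold over sorted dedup keys (pvStepB is commutative)
  have hperm : (PySem.List.dedup start).Perm
      (PySem.List.sorted (PySem.List.dedup ((start.zip finish).map (fun p => p.1))) (fun x => x) false) := by
    rw [hkeys]
    exact (PySem.List.sorted_perm _ _ _).symm
  rw [hperm.foldl_eq' (fun x _ y _ z => pvStepB_comm _ x y z) 0]
  -- fold over sorted keys = fold over canon with pvStepB on L, then replace L's pvBelow by canon's
  have hcanonfold :
      (PySem.List.sorted (PySem.List.dedup ((start.zip finish).map (fun p => p.1))) (fun x => x) false).foldl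
        (pvStepB (start.zip finish)) 0
      = (pvCanon (start.zip finish)).foldl
          (fun a c => pvStepB (pvCanon (start.zip finish)) a c.1) 0 := by
    have hB : pvStepB (pvCanon (start.zip finish)) = pvStepB (start.zip finish) := by
      funext a k
      unfold pvStepB
      rw [pvBelow_canon]
    rw [hB, pvCanon, List.foldl_map]
  rw [hcanonfold, ← pvGoWrap_eq_foldl _ (pvCanon_pairwise _)]

-- ===== VERDICT (by name: the statement is the Claim_ definition above) =====
theorem widestGap_spec : Claim_equal_widestGap := by
  intro n start finish _ hpre
  unfold Spec_widestGap
  rw [pvWidestGap_eq n start finish hpre, pvWidestGapAlt_eq n start finish hpre]
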